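-- pv_equiv track=rewrite | github.com/LiamHeynderickx/engineering-experience-3 | frontend/app/api/processBoard/process_board.py | get_boat_cells
-- ===== SOURCE A (Python) =====
-- def get_boat_cells(start_row, start_col, size, is_vertical):
--     cells = []
--     for i in range(size):
--         row = start_row + i if is_vertical else start_row
--         col = start_col if is_vertical else start_col + i
--         if 0 <= row < 10 and 0 <= col < 10:
--             cells.append((row, col))
--         else:
--             return [] # Out of bounds
--     return cells
-- ===== SOURCE B (Python) =====
-- def get_boat_cells(start_row, start_col, size, is_vertical):
--     if size <= 0:
--         return []
--     end_row = start_row + size - 1 if is_vertical else start_row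
--     end_col = start_col if is_vertical else start_col + size - 1
--     if not (0 <= start_row and 0 <= start_col and end_row < 10 and end_col < 10):
--         return []
--     if is_vertical:
--         return [(start_row + i, start_col) for i in range(size)]
--     return [(start_row, start_col + i) for i in range(size)]
-- ===== Notes on version B (the rewrite author's own statement) =====
-- stated objective: simpler
-- what changed: Replaces the per-cell bounds-checking loop with an O(1) endpoint bounds test (the cells are contiguous) followed by a plain comprehension building the coordinates.
import Mathlib
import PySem

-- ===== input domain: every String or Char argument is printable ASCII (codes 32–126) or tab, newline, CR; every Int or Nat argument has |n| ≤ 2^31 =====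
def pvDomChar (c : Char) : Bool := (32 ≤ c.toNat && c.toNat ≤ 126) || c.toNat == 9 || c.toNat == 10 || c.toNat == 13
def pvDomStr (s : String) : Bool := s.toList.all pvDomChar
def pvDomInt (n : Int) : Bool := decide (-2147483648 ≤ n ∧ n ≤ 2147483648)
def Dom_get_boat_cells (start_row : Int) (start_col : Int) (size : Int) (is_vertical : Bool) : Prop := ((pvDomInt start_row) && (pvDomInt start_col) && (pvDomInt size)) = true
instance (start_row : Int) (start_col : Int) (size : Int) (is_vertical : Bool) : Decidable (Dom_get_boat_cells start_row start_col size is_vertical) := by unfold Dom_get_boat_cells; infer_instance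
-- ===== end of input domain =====

-- B replaces A's per-cell bounds check with an O(1) endpoint bounds test, then builds the list by a map; return values proved equal.

-- ===== PORT A =====
-- A's for-loop over range(size) with early 'return []' on the first out-of-bounds cell.
-- Python's range is lazy, so the loop is ported as counter recursion (fuel = size.toNat, index i).
def get_boat_cells_loop (sr sc : Int) (v : Bool) : Nat → Int → List (Int × Int) → List (Int × Int)
  | 0, _, cells => cells
  | Nat.succ n, i, cells =>
    let row := if v then sr + i else sr
    let col := if v then sc else sc + i
    if 0 ≤ row ∧ row < 10 ∧ 0 ≤ col ∧ col < 10 then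
      get_boat_cells_loop sr sc v n (i + 1) (cells ++ [(row, col)])
    else []

def get_boat_cells (start_row : Int) (start_col : Int) (size : Int) (is_vertical : Bool) : List (Int × Int) :=
  get_boat_cells_loop start_row start_col is_vertical size.toNat 0 []

-- ===== PORT B =====
def get_boat_cells_alt (start_row : Int) (start_col : Int) (size : Int) (is_vertical : Bool) : List (Int × Int) :=
  if size ≤ 0 then []
  else
    let end_row := if is_vertical then start_row + size - 1 else start_row
    let end_col := if is_vertical then start_col else start_col + size - 1
    if ¬ (0 ≤ start_row ∧ 0 ≤ start_col ∧ end_row < 10 ∧ end_col < 10) then []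
    else if is_vertical then
      (PySem.List.pyRange 0 size 1).map (fun i => (start_row + i, start_col))
    else
      (PySem.List.pyRange 0 size 1).map (fun i => (start_row, start_col + i))

-- ===== PRECONDITION & SPEC =====
def Spec_get_boat_cells (start_row : Int) (start_col : Int) (size : Int) (is_vertical : Bool) (out : List (Int × Int)) : Prop := out = get_boat_cells_alt start_row start_col size is_vertical
instance (start_row : Int) (start_col : Int) (size : Int) (is_vertical : Bool) (out : List (Int × Int)) : Decidable (Spec_get_boat_cells start_row start_col size is_vertical out) := by unfold Spec_get_boat_cells; infer_instance

-- ===== CLAIM (what is proved, stated in full; the proofs are below) =====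
def Claim_equal_get_boat_cells : Prop := ∀ (start_row : Int) (start_col : Int) (size : Int) (is_vertical : Bool), Dom_get_boat_cells start_row start_col size is_vertical → Spec_get_boat_cells start_row start_col size is_vertical (get_boat_cells start_row start_col size is_vertical)

-- ===== LEMMAS AND PROOFS =====

-- A's per-cell in-bounds predicate, named for the proofs.
def cellOK (sr sc : Int) (v : Bool) (i : Int) : Prop :=
  0 ≤ (if v then sr + i else sr) ∧ (if v then sr + i else sr) < 10 ∧
  0 ≤ (if v then sc else sc + i) ∧ (if v then sc else sc + i) < 10

lemma loop_all_ok (sr sc : Int) (v : Bool) (n : Nat) (i : Int) (acc : List (Int × Int))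
    (h : ∀ k : Nat, k < n → cellOK sr sc v (i + k)) :
    get_boat_cells_loop sr sc v n i acc
      = acc ++ (List.range n).map
          (fun k : Nat => (if v then sr + (i + (k : Int)) else sr, if v then sc else sc + (i + (k : Int)))) := by
  induction n generalizing i acc with
  | zero => simp [get_boat_cells_loop]
  | succ n ih =>
    have h0 := h 0 (Nat.succ_pos n)
    rw [show i + ((0 : Nat) : Int) = i by simp] at h0
    unfold cellOK at h0
    simp only [get_boat_cells_loop]
    rw [if_pos h0]
    rw [ih (i + 1) _ (fun k hk => by
      have e : i + 1 + (k : Int) = i + ((k + 1 : Nat) : Int) := by push_cast; ring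
      rw [e]
      exact h (k + 1) (Nat.succ_lt_succ hk))]
    rw [List.range_succ_eq_map]
    simp only [List.map_cons, List.map_map, List.append_assoc, List.singleton_append,
      Nat.cast_zero, add_zero]
    congr 1
    congr 1
    apply List.map_congr_left
    intro k _
    simp only [Function.comp_apply]
    push_cast
    ring_nf

lemma loop_bad (sr sc : Int) (v : Bool) (n : Nat) (i : Int) (acc : List (Int × Int))
    (h : ¬ ∀ k : Nat, k < n → cellOK sr sc v (i + k)) :
    get_boat_cells_loop sr sc v n i acc = [] := by
  induction n generalizing i acc with
  | zero => exact absurd (by omega) h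
  | succ n ih =>
    simp only [get_boat_cells_loop]
    by_cases hx : cellOK sr sc v i
    · have hx' := hx
      unfold cellOK at hx'
      rw [if_pos hx']
      apply ih
      intro hall
      apply h
      intro k hk
      cases k with
      | zero => rw [show i + ((0 : Nat) : Int) = i by simp]; exact hx
      | succ k =>
        have := hall k (Nat.lt_of_succ_lt_succ hk)
        have e : i + ((k + 1 : Nat) : Int) = i + 1 + (k : Int) := by push_cast; ring
        rw [e]
        exact this
    · rw [if_neg (by unfold cellOK at hx; exact hx)]

lemma all_ok_iff (sr sc n : Int) (v : Bool) (hn : ¬ n ≤ 0) :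
    (∀ k : Nat, k < n.toNat → cellOK sr sc v ((0 : Int) + k))
      ↔ (0 ≤ sr ∧ 0 ≤ sc ∧ (if v then sr + n - 1 else sr) < 10 ∧ (if v then sc else sc + n - 1) < 10) := by
  constructor
  · intro h
    have h0 := h 0 (by omega)
    have hlast := h (n.toNat - 1) (by omega)
    have hcast : ((n.toNat - 1 : Nat) : Int) = n - 1 := by omega
    unfold cellOK at h0 hlast
    rw [hcast] at hlast
    cases v <;> simp_all <;> omega
  · intro h k hk
    have hkn : (k : Int) < n := by omega
    have hk0 : (0 : Int) ≤ k := by omega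
    unfold cellOK
    cases v <;> simp_all <;> omega

theorem get_boat_cells_eq (sr sc n : Int) (v : Bool) :
    get_boat_cells sr sc n v = get_boat_cells_alt sr sc n v := by
  unfold get_boat_cells get_boat_cells_alt
  by_cases hn : n ≤ 0
  · rw [if_pos hn]
    have : n.toNat = 0 := by omega
    rw [this]
    simp [get_boat_cells_loop]
  · rw [if_neg hn]
    by_cases hok : ∀ k : Nat, k < n.toNat → cellOK sr sc v ((0 : Int) + k)
    · have hcond := (all_ok_iff sr sc n v hn).mp hok
      rw [loop_all_ok sr sc v n.toNat 0 [] hok]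
      rw [if_neg (by tauto)]
      rw [PySem.List.pyRange_one]
      have : (n - 0).toNat = n.toNat := by omega
      rw [this]
      cases v <;> simp [List.map_map, Function.comp]
    · have hcond := fun hc => hok ((all_ok_iff sr sc n v hn).mpr hc)
      rw [loop_bad sr sc v n.toNat 0 [] hok]
      rw [if_pos (by tauto)]

-- ===== VERDICT (by name: the statement is the Claim_ definition above) =====
theorem get_boat_cells_spec : Claim_equal_get_boat_cells := by
  intro sr sc n v _
  unfold Spec_get_boat_cells
  exact get_boat_cells_eq sr sc n v
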